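-- pv_equiv track=rewrite | github.com/aishwaryamathuria/MSDS498_Capstone_Project | dashboard/backend/app.py | combine_final_evaluation
-- ===== SOURCE A (Python) =====
-- def combine_final_evaluation(report_evaluations: list[str]) -> str:
--     if not report_evaluations:
--         return "uncertain"
--     if "reject" in report_evaluations:
--         return "reject"
--     if all(item == "accept" for item in report_evaluations):
--         return "accept"
--     return "uncertain"
-- ===== SOURCE B (Python) =====
-- _SEVERITY_VERDICT = ("accept", "uncertain", "reject")
--
-- def _severity(e):
--     return 2 if e == "reject" else (0 if e == "accept" else 1)
--
-- def combine_final_evaluation(report_evaluations: list[str]) -> str: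
--     if not report_evaluations:
--         return "uncertain"
--     return _SEVERITY_VERDICT[max(map(_severity, report_evaluations))]
-- ===== Notes on version B (the rewrite author's own statement) =====
-- stated objective: alternative
-- what changed: Instead of A's staged scans (membership test for 'reject', then an all() scan for 'accept'), B maps each evaluation to a numeric severity (accept=0, other=1, reject=2), reduces by max, and decodes the verdict from a table; precedence falls out of the max on the severity lattice.
import Mathlib
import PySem

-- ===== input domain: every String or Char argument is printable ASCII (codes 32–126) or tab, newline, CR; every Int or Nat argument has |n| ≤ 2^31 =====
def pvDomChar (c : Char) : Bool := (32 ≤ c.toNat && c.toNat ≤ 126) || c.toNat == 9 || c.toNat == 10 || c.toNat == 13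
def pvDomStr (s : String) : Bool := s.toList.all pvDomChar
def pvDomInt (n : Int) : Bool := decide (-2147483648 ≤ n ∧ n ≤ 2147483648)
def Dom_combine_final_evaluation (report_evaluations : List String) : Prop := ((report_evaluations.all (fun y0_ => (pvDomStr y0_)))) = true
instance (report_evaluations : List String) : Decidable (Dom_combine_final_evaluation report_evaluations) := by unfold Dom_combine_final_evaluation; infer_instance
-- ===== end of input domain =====

-- B replaces A's staged scans by a max-reduction over numeric severities (accept=0, other=1, reject=2) decoded via a table; same cost, alternative algorithm.

-- ===== PORT A =====
def combine_final_evaluation (report_evaluations : List String) : String :=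
  if report_evaluations = [] then "uncertain"
  else if report_evaluations.contains "reject" then "reject"
  else if report_evaluations.all (fun item => item == "accept") then "accept"
  else "uncertain"

-- ===== PORT B =====
def pvSeverity (e : String) : Nat :=
  if e == "reject" then 2 else if e == "accept" then 0 else 1

-- Python's max over a nonempty iterable: first element as start, fold max over the rest.
def combine_final_evaluation_alt (report_evaluations : List String) : String :=
  match report_evaluations.map pvSeverity with
  | [] => "uncertain"
  | s :: ss =>
      -- tuple index _SEVERITY_VERDICT[r]; r ≤ 2 always so getD's default is never used (Python would raise out of range)
      ["accept", "uncertain", "reject"].getD (ss.foldl Nat.max s) "uncertain"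

-- ===== PRECONDITION & SPEC =====
def Spec_combine_final_evaluation (report_evaluations : List String) (out : String) : Prop := out = combine_final_evaluation_alt report_evaluations
instance (report_evaluations : List String) (out : String) : Decidable (Spec_combine_final_evaluation report_evaluations out) := by unfold Spec_combine_final_evaluation; infer_instance

-- ===== CLAIM (what is proved, stated in full; the proofs are below) =====
def Claim_equal_combine_final_evaluation : Prop := ∀ (report_evaluations : List String), Dom_combine_final_evaluation report_evaluations → Spec_combine_final_evaluation report_evaluations (combine_final_evaluation report_evaluations)

-- ===== LEMMAS AND PROOFS =====
theorem pv_fold_shift (ss : List Nat) (m : Nat) :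
    ss.foldl Nat.max m = Nat.max m (ss.foldl Nat.max 0) := by
  induction ss generalizing m with
  | nil => simp
  | cons x xs ih =>
      simp only [List.foldl_cons]
      rw [ih (Nat.max m x), ih (Nat.max 0 x)]
      simp [Nat.max_assoc]

def pvF (l : List String) : Nat := (l.map pvSeverity).foldl Nat.max 0

theorem pv_severity_le (s : String) : pvSeverity s ≤ 2 := by
  unfold pvSeverity; split_ifs <;> omega

theorem pv_max_def (a b : Nat) : Nat.max a b = if a ≤ b then b else a := by
  split_ifs with h
  · exact Nat.max_eq_right h
  · exact Nat.max_eq_left (Nat.le_of_lt (Nat.lt_of_not_le h))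

theorem pv_severity_two (s : String) : pvSeverity s = 2 ↔ s = "reject" := by
  unfold pvSeverity
  by_cases h1 : s = "reject"
  · simp [h1]
  · by_cases h2 : s = "accept" <;> simp [beq_iff_eq, h1, h2]

theorem pv_severity_zero (s : String) : pvSeverity s = 0 ↔ s = "accept" := by
  unfold pvSeverity
  by_cases h1 : s = "reject"
  · simp [h1]
  · by_cases h2 : s = "accept" <;> simp [beq_iff_eq, h1, h2]

theorem pvF_cons (x : String) (xs : List String) :
    pvF (x :: xs) = Nat.max (pvSeverity x) (pvF xs) := by
  simp only [pvF, List.map_cons, List.foldl_cons]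
  rw [pv_fold_shift]
  simp

theorem pvF_le (l : List String) : pvF l ≤ 2 := by
  induction l with
  | nil => simp [pvF]
  | cons x xs ih =>
      rw [pvF_cons]
      have := pv_severity_le x
      rw [pv_max_def]; split_ifs <;> omega

theorem pvF_eq_two (l : List String) : pvF l = 2 ↔ l.contains "reject" = true := by
  induction l with
  | nil => simp [pvF]
  | cons x xs ih =>
      rw [pvF_cons, List.contains_cons]
      have hx := pv_severity_le x
      have hxs := pvF_le xs
      rw [pv_max_def]
      constructor
      · intro h
        split_ifs at h
        · exact Bool.or_eq_true_iff.mpr (Or.inr (ih.mp h))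
        · exact Bool.or_eq_true_iff.mpr (Or.inl (beq_iff_eq.mpr ((pv_severity_two x).mp h).symm))
      · intro h
        rcases Bool.or_eq_true_iff.mp h with h | h
        · have : pvSeverity x = 2 := (pv_severity_two x).mpr (beq_iff_eq.mp h).symm
          split_ifs <;> omega
        · have := ih.mpr h
          split_ifs <;> omega

theorem pvF_eq_zero (l : List String) :
    pvF l = 0 ↔ l.all (fun item => item == "accept") = true := by
  induction l with
  | nil => simp [pvF]
  | cons x xs ih =>
      rw [pvF_cons, List.all_cons]
      rw [pv_max_def]
      constructor
      · intro h
        have h1 : pvSeverity x = 0 := by split_ifs at h <;> omega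
        have h2 : pvF xs = 0 := by split_ifs at h <;> omega
        exact Bool.and_eq_true_iff.mpr ⟨beq_iff_eq.mpr ((pv_severity_zero x).mp h1), ih.mp h2⟩
      · intro h
        rcases Bool.and_eq_true_iff.mp h with ⟨h1, h2⟩
        have hx : pvSeverity x = 0 := (pv_severity_zero x).mpr (beq_iff_eq.mp h1)
        have hxs := ih.mpr h2
        split_ifs <;> omega

-- ===== VERDICT (by name: the statement is the Claim_ definition above) =====
theorem combine_final_evaluation_spec : Claim_equal_combine_final_evaluation := by
  intro l _
  unfold Spec_combine_final_evaluation combine_final_evaluation combine_final_evaluation_alt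
  cases l with
  | nil => simp
  | cons x xs =>
      simp only [List.map_cons, reduceCtorEq, if_false]
      have hxs : (xs.map pvSeverity).foldl Nat.max (pvSeverity x) = pvF (x :: xs) := by
        rw [pv_fold_shift, pvF_cons]; rfl
      rw [hxs]
      have hle := pvF_le (x :: xs)
      by_cases hc : (x :: xs).contains "reject" = true
      · rw [if_pos hc, (pvF_eq_two (x :: xs)).mpr hc]
        rfl
      · rw [if_neg hc]
        by_cases ha : (x :: xs).all (fun item => item == "accept") = true
        · rw [if_pos ha, (pvF_eq_zero (x :: xs)).mpr ha]
          rfl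
        · have hne2 : pvF (x :: xs) ≠ 2 := fun h => hc ((pvF_eq_two _).mp h)
          have hne0 : pvF (x :: xs) ≠ 0 := fun h => ha ((pvF_eq_zero _).mp h)
          have h1 : pvF (x :: xs) = 1 := by omega
          rw [if_neg ha, h1]
          rfl
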